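-- pv_equiv track=rewrite | github.com/birkin/leganto_reading_list_code | instructor_check_flow/10_prepare_oit_initial_subset.py | populate_buckets
-- ===== SOURCE A (Python) =====
-- def populate_buckets( course_code_dict: dict, buckets_dict: dict ) -> dict:
--     """ Populates buckets. """
--     assert type(course_code_dict) == dict
--     assert type(buckets_dict) == dict
--     for key in course_code_dict.keys():
--         if key == 'course_code_institution':
--             buckets_dict['subset_institutions']['all_values'].append( course_code_dict[key] )
--         elif key == 'course_code_department':
--             buckets_dict['subset_departments']['all_values'].append( course_code_dict[key] )
--         elif key == 'course_code_year':
--             buckets_dict['subset_years']['all_values'].append( course_code_dict[key] )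
--         elif key == 'course_code_term':
--             buckets_dict['subset_terms']['all_values'].append( course_code_dict[key] )
--         elif key == 'course_code_section':
--             buckets_dict['subset_sections']['all_values'].append( course_code_dict[key] )
--     return buckets_dict
-- ===== SOURCE B (Python) =====
-- # Inverted traversal: iterate over buckets_dict (not course_code_dict) and pull each
-- # bucket's single feeding value via a reverse 'feeder' map.  Correct because a dict's
-- # keys are unique, so each bucket receives at most one append.  Mutates buckets_dict
-- # in place and returns it, like A.
-- def populate_buckets( course_code_dict: dict, buckets_dict: dict ) -> dict:
--     """ Populates buckets. """
--     assert type(course_code_dict) == dict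
--     assert type(buckets_dict) == dict
--     feeder = {
--         'subset_institutions': 'course_code_institution',
--         'subset_departments': 'course_code_department',
--         'subset_years': 'course_code_year',
--         'subset_terms': 'course_code_term',
--         'subset_sections': 'course_code_section',
--     }
--     for bucket_name, bucket in buckets_dict.items():
--         source_key = feeder.get(bucket_name)
--         if source_key is not None and source_key in course_code_dict:
--             bucket['all_values'].append(course_code_dict[source_key])
--     return buckets_dict
-- ===== Notes on version B (the rewrite author's own statement) =====
-- stated objective: alternative
-- what changed: Inverted the traversal: instead of iterating over course_code_dict and dispatching each key into a bucket, B iterates over buckets_dict and pulls each bucket's single feeding value via a reverse feeder map; this is correct because dict keys are unique, so each bucket receives at most one append.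
-- outside the precondition, e.g. on populate_buckets({'course_code_year': '2024'}, {}): A raises KeyError, B returns {}
import Mathlib
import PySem

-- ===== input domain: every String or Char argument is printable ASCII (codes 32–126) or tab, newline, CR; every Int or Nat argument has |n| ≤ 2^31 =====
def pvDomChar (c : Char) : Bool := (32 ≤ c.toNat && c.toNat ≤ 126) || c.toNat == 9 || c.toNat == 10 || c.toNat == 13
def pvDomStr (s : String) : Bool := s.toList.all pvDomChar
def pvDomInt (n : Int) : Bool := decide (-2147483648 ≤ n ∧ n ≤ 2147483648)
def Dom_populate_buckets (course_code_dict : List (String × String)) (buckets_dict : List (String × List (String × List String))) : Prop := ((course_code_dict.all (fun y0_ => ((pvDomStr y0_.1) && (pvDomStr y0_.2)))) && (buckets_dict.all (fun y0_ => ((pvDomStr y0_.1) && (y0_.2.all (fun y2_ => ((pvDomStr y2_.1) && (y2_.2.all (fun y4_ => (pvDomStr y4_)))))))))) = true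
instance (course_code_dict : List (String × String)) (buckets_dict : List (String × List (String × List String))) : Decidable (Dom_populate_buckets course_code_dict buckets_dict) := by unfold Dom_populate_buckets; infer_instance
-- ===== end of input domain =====

-- B inverts the traversal: it iterates over buckets_dict and pulls each bucket's single feeding
-- value via a reverse feeder map, instead of iterating over course_code_dict and dispatching.
-- Both Pythons mutate buckets_dict in place and return it; the equivalence proved is about the return value.

-- ===== PORT A =====
-- course_code_dict[key]: first-match lookup; the "" default is unreachable because key is drawn from the dict's keys
def pvDictGet (l : List (String × String)) (k : String) : String :=
  match l with
  | [] => ""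
  | p :: rest => if p.1 == k then p.2 else pvDictGet rest k

-- buckets_dict[bn]['all_values'].append(v): in-place list append inside the nested dict (first matching key)
def pvBumpInner (inner : List (String × List String)) (v : String) : List (String × List String) :=
  match inner with
  | [] => []
  | q :: rest => if q.1 == "all_values" then (q.1, q.2 ++ [v]) :: rest else q :: pvBumpInner rest v

def pvBumpBucket (bd : List (String × List (String × List String))) (bn v : String) :
    List (String × List (String × List String)) :=
  match bd with
  | [] => []
  | p :: rest => if p.1 == bn then (p.1, pvBumpInner p.2 v) :: rest else p :: pvBumpBucket rest bn v

def populate_buckets (course_code_dict : List (String × String)) (buckets_dict : List (String × List (String × List String))) : List (String × List (String × List String)) :=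
  (course_code_dict.map Prod.fst).foldl (fun b key =>
    if key == "course_code_institution" then pvBumpBucket b "subset_institutions" (pvDictGet course_code_dict key)
    else if key == "course_code_department" then pvBumpBucket b "subset_departments" (pvDictGet course_code_dict key)
    else if key == "course_code_year" then pvBumpBucket b "subset_years" (pvDictGet course_code_dict key)
    else if key == "course_code_term" then pvBumpBucket b "subset_terms" (pvDictGet course_code_dict key)
    else if key == "course_code_section" then pvBumpBucket b "subset_sections" (pvDictGet course_code_dict key)
    else b) buckets_dict

-- ===== PORT B =====
-- the reverse 'feeder' dict: bucket name -> course-code key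
def pvFeeder : List (String × String) :=
  [("subset_institutions", "course_code_institution"),
   ("subset_departments", "course_code_department"),
   ("subset_years", "course_code_year"),
   ("subset_terms", "course_code_term"),
   ("subset_sections", "course_code_section")]

-- 'k in d' + 'd[k]' fused: first-match lookup returning an Option
def pvLookup? (l : List (String × String)) (k : String) : Option String :=
  match l with
  | [] => none
  | p :: rest => if p.1 == k then some p.2 else pvLookup? rest k

-- d[k] = f(d[k]) on the first matching key (in-place mutation of the association list)
def pvModify {α : Type} (l : List (String × α)) (k : String) (f : α → α) : List (String × α) :=
  match l with
  | [] => []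
  | p :: rest => if p.1 == k then (p.1, f p.2) :: rest else p :: pvModify rest k f

-- B's loop body: for each bucket, find its feeding course-code value (if any) and append it
def pvFeedBucket (course_code_dict : List (String × String)) (q : String × List (String × List String)) :
    String × List (String × List String) :=
  match pvFeeder.find? (fun p => p.1 == q.1) with
  | some p =>
      match pvLookup? course_code_dict p.2 with
      | some v => (q.1, pvModify q.2 "all_values" (fun xs => xs ++ [v]))
      | none => q
  | none => q

def populate_buckets_alt (course_code_dict : List (String × String)) (buckets_dict : List (String × List (String × List String))) : List (String × List (String × List String)) :=
  buckets_dict.map (pvFeedBucket course_code_dict)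

-- ===== PRECONDITION & SPEC =====
def pvBucketName? (k : String) : Option String :=
  if k = "course_code_institution" then some "subset_institutions"
  else if k = "course_code_department" then some "subset_departments"
  else if k = "course_code_year" then some "subset_years"
  else if k = "course_code_term" then some "subset_terms"
  else if k = "course_code_section" then some "subset_sections"
  else none

-- Pre_ excludes (a) association lists with duplicate keys, which do not encode a Python dict, and
-- (b) inputs on which A raises KeyError because a needed bucket or its 'all_values' entry is missing.
def Pre_populate_buckets (course_code_dict : List (String × String)) (buckets_dict : List (String × List (String × List String))) : Prop :=
  (course_code_dict.map Prod.fst).Nodup ∧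
  (buckets_dict.map Prod.fst).Nodup ∧
  (∀ q ∈ buckets_dict, (q.2.map Prod.fst).Nodup) ∧
  (∀ p ∈ course_code_dict, ∀ bn, pvBucketName? p.1 = some bn →
      ∃ q ∈ buckets_dict, q.1 = bn ∧ "all_values" ∈ q.2.map Prod.fst)

instance (course_code_dict : List (String × String)) (buckets_dict : List (String × List (String × List String))) : Decidable (Pre_populate_buckets course_code_dict buckets_dict) := by unfold Pre_populate_buckets; infer_instance

def pvWitness_populate_buckets : (List (String × String)) × (List (String × List (String × List String))) :=
  ([("course_code_year", "2024"), ("other", "x")],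
   [("subset_years", [("all_values", ["2020"])])])

def Spec_populate_buckets (course_code_dict : List (String × String)) (buckets_dict : List (String × List (String × List String))) (out : List (String × List (String × List String))) : Prop := out = populate_buckets_alt course_code_dict buckets_dict
instance (course_code_dict : List (String × String)) (buckets_dict : List (String × List (String × List String))) (out : List (String × List (String × List String))) : Decidable (Spec_populate_buckets course_code_dict buckets_dict out) := by unfold Spec_populate_buckets; infer_instance

-- ===== CLAIM (what is proved, stated in full; the proofs are below) =====
def Claim_equal_populate_buckets : Prop := ∀ (course_code_dict : List (String × String)) (buckets_dict : List (String × List (String × List String))), Dom_populate_buckets course_code_dict buckets_dict → Pre_populate_buckets course_code_dict buckets_dict → Spec_populate_buckets course_code_dict buckets_dict (populate_buckets course_code_dict buckets_dict)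

-- ===== LEMMAS AND PROOFS =====

-- A's fold step, over a (key, value) pair
def pvStep (b : List (String × List (String × List String))) (kv : String × String) :
    List (String × List (String × List String)) :=
  if kv.1 == "course_code_institution" then pvBumpBucket b "subset_institutions" kv.2
  else if kv.1 == "course_code_department" then pvBumpBucket b "subset_departments" kv.2
  else if kv.1 == "course_code_year" then pvBumpBucket b "subset_years" kv.2
  else if kv.1 == "course_code_term" then pvBumpBucket b "subset_terms" kv.2
  else if kv.1 == "course_code_section" then pvBumpBucket b "subset_sections" kv.2
  else b

-- the two nested in-place appends compute the same association list
theorem pvBumpInner_eq (inner : List (String × List String)) (v : String) :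
    pvBumpInner inner v = pvModify inner "all_values" (fun xs => xs ++ [v]) := by
  induction inner with
  | nil => rfl
  | cons q rest ih => simp [pvBumpInner, pvModify, ih]

-- with distinct keys, looking a pair's key up in the whole list returns that pair's value
theorem pvDictGet_self (ccd : List (String × String)) (hnd : (ccd.map Prod.fst).Nodup) :
    ∀ p ∈ ccd, pvDictGet ccd p.1 = p.2 := by
  induction ccd with
  | nil => intro p hp; cases hp
  | cons q rest ih =>
    intro p hp
    simp only [List.map_cons, List.nodup_cons] at hnd
    rcases List.mem_cons.mp hp with h | hp
    · subst h; simp [pvDictGet]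
    · have hne : q.1 ≠ p.1 := by
        intro h; exact hnd.1 (h ▸ (List.mem_map.mpr ⟨p, hp, rfl⟩))
      simp [pvDictGet, beq_iff_eq, hne, ih hnd.2 p hp]

-- A's fold over keys (values looked up in ccd) is the fold of pvStep over the pairs
theorem pvFold_keys_to_pairs (ccd : List (String × String)) (l : List (String × String))
    (hl : ∀ p ∈ l, pvDictGet ccd p.1 = p.2) :
    ∀ (bd : List (String × List (String × List String))),
    (l.map Prod.fst).foldl (fun b key =>
      if key == "course_code_institution" then pvBumpBucket b "subset_institutions" (pvDictGet ccd key)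
      else if key == "course_code_department" then pvBumpBucket b "subset_departments" (pvDictGet ccd key)
      else if key == "course_code_year" then pvBumpBucket b "subset_years" (pvDictGet ccd key)
      else if key == "course_code_term" then pvBumpBucket b "subset_terms" (pvDictGet ccd key)
      else if key == "course_code_section" then pvBumpBucket b "subset_sections" (pvDictGet ccd key)
      else b) bd
    = l.foldl pvStep bd := by
  induction l with
  | nil => intro bd; rfl
  | cons q rest ih =>
    intro bd
    have hq : pvDictGet ccd q.1 = q.2 := hl q (List.mem_cons_self ..)
    simp only [List.map_cons, List.foldl_cons, hq]
    have : pvStep bd q =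
        (if q.1 == "course_code_institution" then pvBumpBucket bd "subset_institutions" q.2
         else if q.1 == "course_code_department" then pvBumpBucket bd "subset_departments" q.2
         else if q.1 == "course_code_year" then pvBumpBucket bd "subset_years" q.2
         else if q.1 == "course_code_term" then pvBumpBucket bd "subset_terms" q.2
         else if q.1 == "course_code_section" then pvBumpBucket bd "subset_sections" q.2
         else bd) := rfl
    rw [← this]
    exact ih (fun p hp => hl p (List.mem_cons_of_mem _ hp)) _

theorem pvLookup?_none (l : List (String × String)) (k : String) (h : k ∉ l.map Prod.fst) :
    pvLookup? l k = none := by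
  induction l with
  | nil => rfl
  | cons p rest ih =>
    simp only [List.map_cons, List.mem_cons, not_or] at h
    simp [pvLookup?, beq_iff_eq, Ne.symm h.1, ih h.2]

-- with at most one occurrence of bn among the keys, pvBumpBucket is a pointwise map
theorem pvBumpBucket_map (bd : List (String × List (String × List String)))
    (hnd : (bd.map Prod.fst).Nodup) (bn v : String) :
    pvBumpBucket bd bn v
      = bd.map (fun q => if q.1 = bn then (q.1, pvBumpInner q.2 v) else q) := by
  induction bd with
  | nil => rfl
  | cons p rest ih =>
    simp only [List.map_cons, List.nodup_cons] at hnd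
    by_cases h : p.1 = bn
    · have : ∀ q ∈ rest, (if q.1 = bn then (q.1, pvBumpInner q.2 v) else q) = q := by
        intro q hq
        have : q.1 ≠ bn := by
          intro he; exact hnd.1 (h ▸ he ▸ (List.mem_map.mpr ⟨q, hq, rfl⟩))
        simp [this]
      simp [pvBumpBucket, beq_iff_eq, h, List.map_congr_left this]
    · simp [pvBumpBucket, beq_iff_eq, h, ih hnd.2]

-- the pointwise bump commutes with pvFeedBucket over the remaining pairs
theorem pvFeed_cons_point (k bn v : String) (l : List (String × String))
    (hk : pvBucketName? k = some bn) (hnk : k ∉ l.map Prod.fst)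
    (q : String × List (String × List String)) :
    pvFeedBucket l (if q.1 = bn then (q.1, pvBumpInner q.2 v) else q)
      = pvFeedBucket ((k, v) :: l) q := by
  have hfive : (k = "course_code_institution" ∧ bn = "subset_institutions")
      ∨ (k = "course_code_department" ∧ bn = "subset_departments")
      ∨ (k = "course_code_year" ∧ bn = "subset_years")
      ∨ (k = "course_code_term" ∧ bn = "subset_terms")
      ∨ (k = "course_code_section" ∧ bn = "subset_sections") := by
    unfold pvBucketName? at hk
    split_ifs at hk with h1 h2 h3 h4 h5 <;> simp_all
  by_cases hq : q.1 = bn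
  · rcases hfive with ⟨hk1, hb1⟩ | ⟨hk1, hb1⟩ | ⟨hk1, hb1⟩ | ⟨hk1, hb1⟩ | ⟨hk1, hb1⟩ <;>
      subst hk1 <;> subst hb1 <;>
      simp [pvFeedBucket, pvFeeder, List.find?, hq, pvLookup?,
            pvLookup?_none l _ hnk, pvBumpInner_eq]
  · simp only [if_neg hq]
    unfold pvFeedBucket
    cases hf : pvFeeder.find? (fun p => p.1 == q.1) with
    | none => rfl
    | some p =>
      have hp : p ∈ pvFeeder := List.mem_of_find?_eq_some hf
      have hpq : p.1 = q.1 := by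
        have := List.find?_some hf; simpa [beq_iff_eq] using this
      have hpk : p.2 ≠ k := by
        rcases hfive with ⟨hk1, hb1⟩ | ⟨hk1, hb1⟩ | ⟨hk1, hb1⟩ | ⟨hk1, hb1⟩ | ⟨hk1, hb1⟩ <;>
          subst hk1 <;> fin_cases hp <;> simp_all
      simp [pvLookup?, beq_iff_eq, Ne.symm hpk]

-- a key that maps to no bucket leaves every pvFeedBucket unchanged
theorem pvFeed_cons_none (k v : String) (l : List (String × String))
    (hk : pvBucketName? k = none) (q : String × List (String × List String)) :
    pvFeedBucket ((k, v) :: l) q = pvFeedBucket l q := by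
  have hfive : k ≠ "course_code_institution" ∧ k ≠ "course_code_department" ∧
      k ≠ "course_code_year" ∧ k ≠ "course_code_term" ∧ k ≠ "course_code_section" := by
    unfold pvBucketName? at hk
    split_ifs at hk <;> simp_all
  unfold pvFeedBucket
  cases hf : pvFeeder.find? (fun p => p.1 == q.1) with
  | none => rfl
  | some p =>
    have hp : p ∈ pvFeeder := List.mem_of_find?_eq_some hf
    have hpk : p.2 ≠ k := by
      fin_cases hp <;> simp_all <;> exact fun he => (by simp_all : False)
    simp [pvLookup?, beq_iff_eq, Ne.symm hpk]

-- a key that maps to no bucket makes A's step a no-op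
theorem pvStep_none (bd : List (String × List (String × List String))) (k v : String)
    (hk : pvBucketName? k = none) : pvStep bd (k, v) = bd := by
  unfold pvBucketName? at hk
  unfold pvStep
  split_ifs at hk <;> simp_all [beq_iff_eq]

-- a key that maps to bucket bn makes A's step a bump of bn
theorem pvStep_some (bd : List (String × List (String × List String))) (k bn v : String)
    (hk : pvBucketName? k = some bn) : pvStep bd (k, v) = pvBumpBucket bd bn v := by
  unfold pvBucketName? at hk
  unfold pvStep
  split_ifs at hk with h1 h2 h3 h4 h5 <;> simp_all [beq_iff_eq]

-- bumping a bucket does not change the list of bucket names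
theorem pvBumpBucket_keys (bd : List (String × List (String × List String))) (bn v : String) :
    (pvBumpBucket bd bn v).map Prod.fst = bd.map Prod.fst := by
  induction bd with
  | nil => rfl
  | cons p rest ih =>
    by_cases h : p.1 = bn <;> simp [pvBumpBucket, beq_iff_eq, h, ih]

-- MAIN: A's fold over the pairs equals B's map over the buckets
theorem pvFold_eq_map (l : List (String × String)) (hnl : (l.map Prod.fst).Nodup) :
    ∀ (bd : List (String × List (String × List String))), (bd.map Prod.fst).Nodup →
    l.foldl pvStep bd = bd.map (pvFeedBucket l) := by
  induction l with
  | nil =>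
    intro bd _
    have h : ∀ q ∈ bd, pvFeedBucket ([] : List (String × String)) q = q := by
      intro q _
      unfold pvFeedBucket
      cases pvFeeder.find? (fun p => p.1 == q.1) <;> simp [pvLookup?]
    simp [List.foldl_nil, List.map_congr_left h]
  | cons kv rest ih =>
    intro bd hbd
    simp only [List.map_cons, List.nodup_cons] at hnl
    obtain ⟨k, v⟩ := kv
    simp only [List.foldl_cons]
    cases hk : pvBucketName? k with
    | none =>
      rw [pvStep_none bd k v hk, ih hnl.2 bd hbd]
      exact (List.map_congr_left (fun q _ => (pvFeed_cons_none k v rest hk q).symm)).symm ▸ rfl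
    | some bn =>
      rw [pvStep_some bd k bn v hk]
      have hkeys : ((pvBumpBucket bd bn v).map Prod.fst).Nodup := by
        rw [pvBumpBucket_keys]; exact hbd
      rw [ih hnl.2 _ hkeys, pvBumpBucket_map bd hbd bn v, List.map_map]
      exact List.map_congr_left (fun q _ => pvFeed_cons_point k bn v rest hk hnl.1 q)

-- ===== VERDICT (by name: the statement is the Claim_ definition above) =====
theorem populate_buckets_spec : Claim_equal_populate_buckets := by
  intro ccd bd _ hpre
  unfold Spec_populate_buckets populate_buckets populate_buckets_alt
  rw [pvFold_keys_to_pairs ccd ccd (pvDictGet_self ccd hpre.1) bd]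
  exact pvFold_eq_map ccd hpre.1 bd hpre.2.1
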